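-- pv_equiv track=rewrite | github.com/thelonejordan/dynamic_programming_mit6.006 | dp/bowling/main.py | _bowl
-- ===== SOURCE A (Python) =====
-- from typing import List, Dict
--
-- def _bowl(i: int, pins: List[int], memo: Dict[int, int]):
--   if i >= len(pins): return 0  # basecase: _bowl(i=n) = 0
--   if i in memo: return memo[i]
--   case1, case2, case3 = 0, 0, 0   # its ok as you start from 0 (min score possible)
--   if i < len(pins):
--     case1 = _bowl(i+1, pins, memo)  # do nothing
--     case2 = pins[i] + case1  # hit pin i
--   if i+1 < len(pins):
--     case3 = pins[i] * pins[i+1] + _bowl(i+2, pins, memo)  # hit pin i and pin i+1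
--   ret = memo[i] = max(case1, case2, case3)
--   return ret
-- ===== SOURCE B (Python) =====
-- def _bowl(i, pins, memo):
--     # Bottom-up iterative DP (explicit table instead of recursion); honors pre-existing memo entries.
--     # Return value matches A; like A it also fills memo as a side effect (it may
--     # fill entries at indices A's recursion would skip past).
--     n = len(pins)
--     if i >= n:
--         return 0
--     if i in memo:
--         return memo[i]
--     vals = {}
--     for j in range(n - 1, i - 1, -1):
--         if j in memo:
--             vals[j] = memo[j]
--         else:
--             c1 = vals.get(j + 1, 0)
--             best = max(c1, pins[j] + c1)
--             if j + 1 < n: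
--                 best = max(best, pins[j] * pins[j + 1] + vals.get(j + 2, 0))
--             memo[j] = vals[j] = best
--     return vals[i]
-- ===== Notes on version B (the rewrite author's own statement) =====
-- stated objective: alternative
-- what changed: Replaces A's top-down memoized recursion with a bottom-up iterative DP loop from n-1 down to i (explicit table, no recursion), keeping pre-existing memo entries; it trades the call stack for an extra table and is not measurably faster.
import Mathlib
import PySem

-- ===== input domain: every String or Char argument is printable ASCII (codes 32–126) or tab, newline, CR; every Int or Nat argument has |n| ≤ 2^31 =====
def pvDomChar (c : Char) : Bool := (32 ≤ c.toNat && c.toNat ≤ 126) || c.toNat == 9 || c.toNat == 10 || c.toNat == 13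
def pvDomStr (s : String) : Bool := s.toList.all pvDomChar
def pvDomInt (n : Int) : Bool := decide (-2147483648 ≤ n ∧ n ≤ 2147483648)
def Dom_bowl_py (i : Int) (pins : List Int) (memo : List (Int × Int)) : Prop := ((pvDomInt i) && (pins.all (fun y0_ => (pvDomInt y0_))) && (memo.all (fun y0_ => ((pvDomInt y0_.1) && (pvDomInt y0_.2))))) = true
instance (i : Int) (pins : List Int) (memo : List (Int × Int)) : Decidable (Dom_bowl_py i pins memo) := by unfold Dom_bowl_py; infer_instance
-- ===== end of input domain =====

-- B replaces A's top-down memoized recursion by a bottom-up iterative DP loop (no recursion).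
-- Both Pythons mutate `memo`; the equivalence proved here is about the RETURN value only
-- (B may fill memo entries at indices A's recursion skips past).

-- ===== PORT A =====
-- Literal port of A's recursion, threading the mutated memo dict through the calls.
-- pins[i] / pins[i+1] are ported as pyGetD _ _ 0: the IndexError inputs (i < -len(pins)
-- with i not a memo key) are exactly the ones Pre_bowl_py excludes.
def bowlA (pins : List Int) (i : Int) (memo : PySem.Dict Int Int) : Int × PySem.Dict Int Int :=
  if i ≥ (pins.length : Int) then (0, memo)
  else
    match memo.get? i with
    | some v => (v, memo)
    | none =>
      -- case1, case2, case3 = 0, 0, 0; if i < len(pins): case1 = _bowl(i+1); case2 = pins[i] + case1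
      let p :=
        if i < (pins.length : Int) then
          let r1 := bowlA pins (i + 1) memo
          ((r1.1, PySem.List.pyGetD pins i 0 + r1.1), r1.2)
        else ((0, 0), memo)
      -- if i+1 < len(pins): case3 = pins[i] * pins[i+1] + _bowl(i+2)
      let q :=
        if i + 1 < (pins.length : Int) then
          let r2 := bowlA pins (i + 2) p.2
          (PySem.List.pyGetD pins i 0 * PySem.List.pyGetD pins (i + 1) 0 + r2.1, r2.2)
        else (0, p.2)
      let ret := max p.1.1 (max p.1.2 q.1)
      (ret, q.2.insert i ret)
termination_by ((pins.length : Int) - i).toNat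
decreasing_by all_goals omega

def bowl_py (i : Int) (pins : List Int) (memo : List (Int × Int)) : Int :=
  (bowlA pins i (PySem.Dict.mk memo)).1

-- ===== PORT B =====
-- Literal port of Source B: one foldl over range(n-1, i-1, -1); `vals[i]` at the end cannot
-- be a KeyError (the range contains i), ported as getD _ i 0; the writes Source B makes into
-- `memo` do not affect the return value and are not modeled.
def bowl_py_alt (i : Int) (pins : List Int) (memo : List (Int × Int)) : Int :=
  let m := PySem.Dict.mk memo
  let n : Int := pins.length
  if i ≥ n then 0
  else
    match m.get? i with
    | some v => v
    | none =>
      let vals := (PySem.List.pyRange (n - 1) (i - 1) (-1)).foldl (fun vals j =>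
        match m.get? j with
        | some v => vals.insert j v
        | none =>
          let c1 := vals.getD (j + 1) 0
          let best := max c1 (PySem.List.pyGetD pins j 0 + c1)
          let best := if j + 1 < n then
              max best (PySem.List.pyGetD pins j 0 * PySem.List.pyGetD pins (j + 1) 0 + vals.getD (j + 2) 0)
            else best
          vals.insert j best) PySem.Dict.empty
      vals.getD i 0

-- ===== PRECONDITION & SPEC =====
-- Pre_ excludes exactly the inputs where the Python A raises IndexError: i below -len(pins)
-- (so pins[i] is out of range even after negative-index wraparound) and i not a memo key.
def Pre_bowl_py (i : Int) (pins : List Int) (memo : List (Int × Int)) : Prop :=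
  i ∈ memo.map Prod.fst ∨ -(pins.length : Int) ≤ i
instance (i : Int) (pins : List Int) (memo : List (Int × Int)) : Decidable (Pre_bowl_py i pins memo) := by unfold Pre_bowl_py; infer_instance

def pvWitness_bowl_py : Int × List Int × (List (Int × Int)) := (0, [2, 3, 5, 1], [(2, 9)])

def Spec_bowl_py (i : Int) (pins : List Int) (memo : List (Int × Int)) (out : Int) : Prop := out = bowl_py_alt i pins memo
instance (i : Int) (pins : List Int) (memo : List (Int × Int)) (out : Int) : Decidable (Spec_bowl_py i pins memo out) := by unfold Spec_bowl_py; infer_instance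

-- ===== CLAIM (what is proved, stated in full; the proofs are below) =====
def Claim_equal_bowl_py : Prop := ∀ (i : Int) (pins : List Int) (memo : List (Int × Int)), Dom_bowl_py i pins memo → Pre_bowl_py i pins memo → Spec_bowl_py i pins memo (bowl_py i pins memo)

-- ===== LEMMAS AND PROOFS =====

-- The common value function: fval pins m0 j = the score A/B compute for index j against
-- the ORIGINAL memo m0 (memo entries override the recurrence).
def fval (pins : List Int) (m0 : PySem.Dict Int Int) (j : Int) : Int :=
  if j ≥ (pins.length : Int) then 0
  else
    match m0.get? j with
    | some v => v
    | none =>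
      let c1 := fval pins m0 (j + 1)
      let c2 := PySem.List.pyGetD pins j 0 + c1
      let c3 := if j + 1 < (pins.length : Int) then
          PySem.List.pyGetD pins j 0 * PySem.List.pyGetD pins (j + 1) 0 + fval pins m0 (j + 2)
        else 0
      max c1 (max c2 c3)
termination_by ((pins.length : Int) - j).toNat
decreasing_by all_goals omega

-- invariant for A's threaded memo: every entry is an original one or a correct fval
def GoodA (m0 m : PySem.Dict Int Int) (pins : List Int) : Prop :=
  ∀ k, m.get? k = m0.get? k ∨ m.get? k = some (fval pins m0 k)

theorem fval_of_get?_eq_some {pins : List Int} {m0 : PySem.Dict Int Int} {j : Int} {v : Int}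
    (hj : ¬ j ≥ (pins.length : Int)) (h : m0.get? j = some v) : fval pins m0 j = v := by
  rw [fval]; simp [hj, h]

-- the recursive (cache-miss) case of bowlA_correct, factored out
theorem bowlA_step (pins : List Int) (m0 : PySem.Dict Int Int) (t : Nat) (i : Int)
    (m : PySem.Dict Int Int)
    (ih : ∀ (i : Int) (m : PySem.Dict Int Int), ((pins.length : Int) - i).toNat ≤ t →
      GoodA m0 m pins → (bowlA pins i m).1 = fval pins m0 i ∧ GoodA m0 (bowlA pins i m).2 pins)
    (hi : ¬ i ≥ (pins.length : Int)) (h0 : m0.get? i = none) (hm : m.get? i = none)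
    (hg : GoodA m0 m pins) (ht : ((pins.length : Int) - i).toNat ≤ t + 1) :
    (bowlA pins i m).1 = fval pins m0 i ∧ GoodA m0 (bowlA pins i m).2 pins := by
  have hlt : i < (pins.length : Int) := by omega
  obtain ⟨h1v, h1g⟩ := ih (i + 1) m (by omega) hg
  have hfv : fval pins m0 i = max (fval pins m0 (i + 1))
      (max (PySem.List.pyGetD pins i 0 + fval pins m0 (i + 1))
        (if i + 1 < (pins.length : Int) then
          PySem.List.pyGetD pins i 0 * PySem.List.pyGetD pins (i + 1) 0 + fval pins m0 (i + 2)
        else 0)) := by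
    rw [fval]; simp [hi, h0]
  by_cases h2 : i + 1 < (pins.length : Int)
  · obtain ⟨h2v, h2g⟩ := ih (i + 2) (bowlA pins (i + 1) m).2 (by omega) h1g
    have hA : bowlA pins i m = (fval pins m0 i,
        ((bowlA pins (i + 2) (bowlA pins (i + 1) m).2).2).insert i (fval pins m0 i)) := by
      rw [bowlA]
      simp only [hi, if_false, hm, hlt, if_true, h2, h1v, h2v, hfv]
    refine ⟨by rw [hA], ?_⟩
    rw [hA]
    intro k
    rcases eq_or_ne k i with rfl | hk
    · right; rw [PySem.Dict.get?_insert_self]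
    · rw [PySem.Dict.get?_insert_of_ne _ _ hk]; exact h2g k
  · have hA : bowlA pins i m = (fval pins m0 i,
        ((bowlA pins (i + 1) m).2).insert i (fval pins m0 i)) := by
      rw [bowlA]
      simp only [hi, if_false, hm, hlt, if_true, h2, h1v, hfv]
    refine ⟨by rw [hA], ?_⟩
    rw [hA]
    intro k
    rcases eq_or_ne k i with rfl | hk
    · right; rw [PySem.Dict.get?_insert_self]
    · rw [PySem.Dict.get?_insert_of_ne _ _ hk]; exact h1g k

theorem bowlA_correct (pins : List Int) (m0 : PySem.Dict Int Int) :
    ∀ (t : Nat) (i : Int) (m : PySem.Dict Int Int), ((pins.length : Int) - i).toNat ≤ t →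
      GoodA m0 m pins →
      (bowlA pins i m).1 = fval pins m0 i ∧ GoodA m0 (bowlA pins i m).2 pins := by
  intro t
  induction t with
  | zero =>
    intro i m ht hg
    have hi : i ≥ (pins.length : Int) := by omega
    rw [bowlA, fval]; simp [hi, hg]
  | succ t ih =>
    intro i m ht hg
    by_cases hi : i ≥ (pins.length : Int)
    · rw [bowlA, fval]; simp [hi, hg]
    · rcases hg i with hgi | hgi
      · cases h0 : m0.get? i with
        | some v =>
          have hm : m.get? i = some v := hgi.trans h0
          rw [bowlA, fval]; simp [hi, hm, h0, hg]
        | none =>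
          have hm : m.get? i = none := hgi.trans h0
          exact bowlA_step pins m0 t i m ih hi h0 hm hg ht
      · cases hm : m.get? i with
        | none => simp [hm] at hgi
        | some v =>
          have hv : v = fval pins m0 i := by simpa [hm] using hgi
          rw [bowlA]; simp [hi, hm, hv, hg]


theorem bowl_py_eq_fval (i : Int) (pins : List Int) (memo : List (Int × Int)) :
    bowl_py i pins memo = fval pins (PySem.Dict.mk memo) i := by
  exact (bowlA_correct pins (PySem.Dict.mk memo) ((pins.length : Int) - i).toNat i
    (PySem.Dict.mk memo) le_rfl (fun k => Or.inl rfl)).1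

-- invariant for B's fold: after processing down to index j, vals holds exactly
-- the keys j ≤ k < n, each with value fval k
def InvB (pins : List Int) (m0 : PySem.Dict Int Int) (vals : PySem.Dict Int Int) (j : Int) : Prop :=
  (∀ k, j ≤ k → k < (pins.length : Int) → vals.get? k = some (fval pins m0 k)) ∧
  (∀ k, k < j ∨ (pins.length : Int) ≤ k → vals.get? k = none)

-- B's loop body as a named function (definitionally the lambda inside bowl_py_alt)
def stepB (pins : List Int) (m0 : PySem.Dict Int Int) (vals : PySem.Dict Int Int) (j : Int) :
    PySem.Dict Int Int :=
  match m0.get? j with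
  | some v => vals.insert j v
  | none =>
    let c1 := vals.getD (j + 1) 0
    let best := max c1 (PySem.List.pyGetD pins j 0 + c1)
    let best := if j + 1 < (pins.length : Int) then
        max best (PySem.List.pyGetD pins j 0 * PySem.List.pyGetD pins (j + 1) 0 + vals.getD (j + 2) 0)
      else best
    vals.insert j best

theorem invB_getD (pins : List Int) (m0 vals : PySem.Dict Int Int) (j : Int)
    (hinv : InvB pins m0 vals j) : ∀ k, j ≤ k → vals.getD k 0 = fval pins m0 k := by
  intro k hk
  by_cases hkn : k < (pins.length : Int)
  · exact PySem.Dict.getD_of_get?_eq_some vals 0 (hinv.1 k hk hkn)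
  · rw [PySem.Dict.getD_of_get?_eq_none vals 0 (hinv.2 k (Or.inr (by omega)))]
    rw [fval]; simp [show k ≥ (pins.length : Int) by omega]

theorem stepB_inv (pins : List Int) (m0 vals : PySem.Dict Int Int) (j : Int)
    (hj : j < (pins.length : Int)) (hinv : InvB pins m0 vals (j + 1)) :
    InvB pins m0 (stepB pins m0 vals j) j := by
  have hgD := invB_getD pins m0 vals (j + 1) hinv
  have hval : stepB pins m0 vals j = vals.insert j (fval pins m0 j) := by
    rw [stepB]
    cases h0 : m0.get? j with
    | some v => rw [fval_of_get?_eq_some (pins := pins) (show ¬ j ≥ (pins.length : Int) by omega) h0]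
    | none =>
      have hfv : fval pins m0 j = max (fval pins m0 (j + 1))
          (max (PySem.List.pyGetD pins j 0 + fval pins m0 (j + 1))
            (if j + 1 < (pins.length : Int) then
              PySem.List.pyGetD pins j 0 * PySem.List.pyGetD pins (j + 1) 0 + fval pins m0 (j + 2)
            else 0)) := by
        rw [fval]; simp [show ¬ j ≥ (pins.length : Int) by omega, h0]
      simp only [hgD (j + 1) le_rfl, hgD (j + 2) (by omega), hfv]
      by_cases h2 : j + 1 < (pins.length : Int)
      · simp only [h2, if_true, max_assoc]
      · have hz : fval pins m0 (j + 1) = 0 := by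
          rw [fval]; simp [show j + 1 ≥ (pins.length : Int) by omega]
        simp only [h2, if_false, hz, ← max_assoc, max_eq_left (le_max_left (0:Int) _)]
  rw [hval]
  constructor
  · intro k hk hkn
    rcases eq_or_ne k j with rfl | hne
    · rw [PySem.Dict.get?_insert_self]
    · rw [PySem.Dict.get?_insert_of_ne _ _ hne]; exact hinv.1 k (by omega) hkn
  · intro k hk
    have hne : k ≠ j := by rcases hk with h | h <;> omega
    rw [PySem.Dict.get?_insert_of_ne _ _ hne]
    exact hinv.2 k (by rcases hk with h | h <;> omega)

theorem foldB_inv (pins : List Int) (m0 : PySem.Dict Int Int) (i : Int) :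
    ∀ (t : Nat) (a : Int) (vals : PySem.Dict Int Int), (a - i + 1).toNat ≤ t →
      i ≤ a + 1 → a < (pins.length : Int) → InvB pins m0 vals (a + 1) →
      InvB pins m0 ((PySem.List.pyRange a (i - 1) (-1)).foldl (stepB pins m0) vals) i := by
  intro t
  induction t with
  | zero =>
    intro a vals ht hi ha hinv
    have hai : a + 1 = i := by omega
    have hnil : PySem.List.pyRange a (i - 1) (-1) = [] := by
      simp [PySem.List.pyRange, show ¬ i - 1 < a by omega]
    rw [hnil]; simpa [hai] using hinv
  | succ t ih =>
    intro a vals ht hi ha hinv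
    by_cases hai : a < i
    · have hai' : a + 1 = i := by omega
      have hnil : PySem.List.pyRange a (i - 1) (-1) = [] := by
        simp [PySem.List.pyRange, show ¬ i - 1 < a by omega]
      rw [hnil]; simpa [hai'] using hinv
    · rw [PySem.List.pyRange_neg_one_cons (show i - 1 < a by omega), List.foldl_cons]
      have hstep := stepB_inv pins m0 vals a ha hinv
      have := ih (a - 1) (stepB pins m0 vals a) (by omega) (by omega) (by omega)
        (by simpa using hstep)
      simpa using this

theorem bowl_py_alt_eq_fval (i : Int) (pins : List Int) (memo : List (Int × Int)) :
    bowl_py_alt i pins memo = fval pins (PySem.Dict.mk memo) i := by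
  show (let m := PySem.Dict.mk memo
    let n : Int := pins.length
    if i ≥ n then 0
    else
      match m.get? i with
      | some v => v
      | none =>
        let vals := (PySem.List.pyRange (n - 1) (i - 1) (-1)).foldl (stepB pins m) PySem.Dict.empty
        vals.getD i 0) = fval pins (PySem.Dict.mk memo) i
  simp only []
  by_cases hi : i ≥ (pins.length : Int)
  · rw [fval]; simp [hi]
  · cases h0 : (PySem.Dict.mk memo).get? i with
    | some v => simp [hi, fval_of_get?_eq_some hi h0]
    | none =>
      simp only [hi, if_false]
      have hinv : InvB pins (PySem.Dict.mk memo) PySem.Dict.empty ((pins.length : Int) - 1 + 1) := by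
        constructor
        · intro k hk hkn; omega
        · intro k _; exact PySem.Dict.get?_empty k
      have hres := foldB_inv pins (PySem.Dict.mk memo) i ((pins.length : Int) - 1 - i + 1).toNat
        ((pins.length : Int) - 1) PySem.Dict.empty le_rfl (by omega) (by omega) hinv
      exact PySem.Dict.getD_of_get?_eq_some _ 0 (hres.1 i le_rfl (by omega))

-- ===== VERDICT (by name: the statement is the Claim_ definition above) =====
theorem bowl_py_spec : Claim_equal_bowl_py := by
  intro i pins memo _ _
  unfold Spec_bowl_py
  rw [bowl_py_eq_fval, bowl_py_alt_eq_fval]
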